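-- pv_equiv track=rewrite | github.com/rolandtolnay/session-index | recent_context.py | _format_cross_project
-- ===== SOURCE A (Python) =====
-- def _format_cross_project(sessions: list[dict]) -> list[str]:
--     """Group cross-project sessions into compact index lines."""
--     groups: dict[str, list[dict]] = {}
--     for s in sessions:
--         proj = s.get("project", "unknown")
--         groups.setdefault(proj, []).append(s)
--
--     lines = []
--     max_branches = 2
--     for project, sess_list in groups.items():
--         count = len(sess_list)
--         branches = sorted(set(s.get("branch", "") for s in sess_list if s.get("branch")))
--         sources = sorted(set(s.get("source", "") for s in sess_list if s.get("source") and s.get("source") != "claude"))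
--         if not branches:
--             branch_str = "unknown"
--         elif len(branches) <= max_branches:
--             branch_str = ", ".join(branches)
--         else:
--             branch_str = ", ".join(branches[:max_branches]) + f" +{len(branches) - max_branches} more"
--         source_str = f" [{', '.join(sources)}]" if sources else ""
--         count_str = f"{count} session{'s' if count > 1 else ''}"
--         lines.append(f"- {project}{source_str} — {count_str} ({branch_str})")
--     return lines
-- ===== SOURCE B (Python) =====
-- def _line(project, sessions):
--     group = [s for s in sessions if s.get("project", "unknown") == project]
--     branches = sorted({b for b in (s.get("branch", "") for s in group) if b})
--     sources = sorted({x for x in (s.get("source", "") for s in group)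
--                       if x and x != "claude"})
--     extra = branches[2:]
--     branch_str = ("unknown" if not branches
--                   else ", ".join(branches[:2])
--                        + (f" +{len(extra)} more" if extra else ""))
--     source_str = f" [{', '.join(sources)}]" if sources else ""
--     n = len(group)
--     return f"- {project}{source_str} — {n} session{'s' if n > 1 else ''} ({branch_str})"
--
--
-- def _format_cross_project(sessions: list[dict]) -> list[str]:
--     """No grouping dict: dedup projects in first-seen order, then rescan per project."""
--     projects: list[str] = []
--     for s in sessions:
--         p = s.get("project", "unknown")
--         if p not in projects:
--             projects.append(p)
--     return [_line(p, sessions) for p in projects]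
-- ===== Notes on version B (the rewrite author's own statement) =====
-- stated objective: alternative
-- what changed: Drops A's grouping dict entirely: B dedups project names in first-seen order, then rescans the full session list once per project inside a comprehension, building branch/source sets by map-then-filter and formatting via branches[:2]/branches[2:] slices instead of A's length-test chain.
import Mathlib
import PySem

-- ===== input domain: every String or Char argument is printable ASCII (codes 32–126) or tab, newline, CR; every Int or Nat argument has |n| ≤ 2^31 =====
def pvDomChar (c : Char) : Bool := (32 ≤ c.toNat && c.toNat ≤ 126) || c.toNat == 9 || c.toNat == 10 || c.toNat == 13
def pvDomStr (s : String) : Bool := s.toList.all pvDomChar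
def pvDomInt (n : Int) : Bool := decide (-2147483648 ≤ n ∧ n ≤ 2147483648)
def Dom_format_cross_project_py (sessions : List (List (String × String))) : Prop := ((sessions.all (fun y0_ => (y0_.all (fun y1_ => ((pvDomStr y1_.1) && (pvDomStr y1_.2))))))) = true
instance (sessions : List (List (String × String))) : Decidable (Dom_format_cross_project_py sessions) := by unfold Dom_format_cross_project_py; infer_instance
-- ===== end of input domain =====

-- B drops A's grouping dict: it dedups project names in first-seen order, then rescans the
-- session list per project, with set-building and formatting decomposed differently; objective: alternative.

-- shared helper: s.get(k, dflt) on a session dict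
def sgetD (s : List (String × String)) (k dflt : String) : String :=
  (PySem.Dict.mk s).getD k dflt

-- ===== PORT A =====
def format_cross_project_py (sessions : List (List (String × String))) : List String :=
  let groups : PySem.Dict String (List (List (String × String))) :=
    sessions.foldl (fun d s =>
      -- groups.setdefault(proj, []).append(s)
      d.modify (sgetD s "project" "unknown") [] (fun l => l ++ [s])) PySem.Dict.empty
  groups.items.foldl (fun lines pr =>
    let project := pr.1
    let sess_list := pr.2
    let count : Int := (sess_list.length : Int)
    let branches := PySem.List.sorted
      (PySem.Set.ofList ((sess_list.filter (fun s => sgetD s "branch" "" != "")).map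
        (fun s => sgetD s "branch" ""))) (fun x => x) false
    let sources := PySem.List.sorted
      (PySem.Set.ofList ((sess_list.filter (fun s =>
          sgetD s "source" "" != "" && sgetD s "source" "" != "claude")).map
        (fun s => sgetD s "source" ""))) (fun x => x) false
    let branch_str :=
      if branches = [] then "unknown"
      else if branches.length ≤ 2 then PySem.Str.join ", " branches
      else PySem.Str.join ", " (branches.take 2) ++ " +" ++
           PySem.Int.toStr ((branches.length : Int) - 2) ++ " more"
    let source_str := if sources ≠ [] then " [" ++ PySem.Str.join ", " sources ++ "]" else ""
    let count_str := PySem.Int.toStr count ++ " session" ++ (if count > 1 then "s" else "")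
    lines ++ ["- " ++ project ++ source_str ++ " — " ++ count_str ++ " (" ++ branch_str ++ ")"]) []

-- ===== PORT B =====
-- port of Source B's _line helper
def pvLine (project : String) (sessions : List (List (String × String))) : String :=
  let group := sessions.filter (fun s => sgetD s "project" "unknown" == project)
  let branches := PySem.List.sorted
    (PySem.Set.ofList ((group.map (fun s => sgetD s "branch" "")).filter (fun b => b != "")))
    (fun x => x) false
  let sources := PySem.List.sorted
    (PySem.Set.ofList ((group.map (fun s => sgetD s "source" "")).filter
      (fun x => x != "" && x != "claude"))) (fun x => x) false
  let extra := branches.drop 2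
  let branch_str :=
    if branches = [] then "unknown"
    else PySem.Str.join ", " (branches.take 2) ++
         (if extra ≠ [] then " +" ++ PySem.Int.toStr ((extra.length : Int)) ++ " more" else "")
  let source_str := if sources ≠ [] then " [" ++ PySem.Str.join ", " sources ++ "]" else ""
  let n : Int := (group.length : Int)
  "- " ++ project ++ source_str ++ " — " ++ PySem.Int.toStr n ++ " session" ++
    (if n > 1 then "s" else "") ++ " (" ++ branch_str ++ ")"

def format_cross_project_py_alt (sessions : List (List (String × String))) : List String :=
  let projects : List String :=
    sessions.foldl (fun ps s =>
      let p := sgetD s "project" "unknown"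
      if p ∈ ps then ps else ps ++ [p]) []
  projects.map (fun p => pvLine p sessions)

-- ===== PRECONDITION & SPEC =====
def Spec_format_cross_project_py (sessions : List (List (String × String))) (out : List String) : Prop := out = format_cross_project_py_alt sessions
instance (sessions : List (List (String × String))) (out : List String) : Decidable (Spec_format_cross_project_py sessions out) := by unfold Spec_format_cross_project_py; infer_instance

-- ===== CLAIM =====
def Claim_equal_format_cross_project_py : Prop := ∀ (sessions : List (List (String × String))), Dom_format_cross_project_py sessions → Spec_format_cross_project_py sessions (format_cross_project_py sessions)

-- ===== LEMMAS AND PROOFS =====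

-- a keyed modify loop read back at one key is a fold over that key's group
theorem getD_foldl_modify_gen {κ β α : Type} [BEq κ] [LawfulBEq κ] [DecidableEq κ]
    (l : List α) (key : α → κ) (d0 : β) (f : β → α → β) (d : PySem.Dict κ β) (c : κ) :
    (l.foldl (fun d x => d.modify (key x) d0 (fun v => f v x)) d).getD c d0
      = (l.filter (fun x => key x == c)).foldl f (d.getD c d0) := by
  induction l generalizing d with
  | nil => rfl
  | cons x t ih =>
    simp only [List.foldl_cons, List.filter_cons]
    rw [ih, PySem.Dict.getD_modify]
    by_cases h : key x = c
    · simp [h]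
    · simp [h, Ne.symm h]

-- filter-then-map equals map-then-filter when the test only looks at the mapped value
theorem filter_map_comm {α β : Type} (l : List α) (f : α → β) (p : β → Bool) :
    (l.filter (fun x => p (f x))).map f = (l.map f).filter p := by
  induction l with
  | nil => rfl
  | cons x t ih =>
    simp only [List.filter_cons, List.map_cons]
    cases h : p (f x) <;> simp [ih]
    

-- ===== VERDICT =====
theorem format_cross_project_py_spec : Claim_equal_format_cross_project_py := by
  intro sessions _
  unfold Spec_format_cross_project_py format_cross_project_py format_cross_project_py_alt
  simp only [PySem.List.foldl_append_singleton_eq_map, List.nil_append]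
  -- A's dict: items = keys.map pairing, keys = set of projects in first-seen order
  rw [PySem.Dict.items_eq_map_keys _
        (PySem.Dict.nodup_keys_foldl_modify_key _ _ _ _ _ PySem.Dict.nodup_keys_empty) [],
      PySem.Dict.keys_foldl_modify_key]
  -- B's dedup loop is the same set of projects
  have hB : sessions.foldl (fun ps s =>
        let p := sgetD s "project" "unknown"
        if p ∈ ps then ps else ps ++ [p]) []
      = PySem.Set.update (PySem.Dict.empty : PySem.Dict String (List (List (String × String)))).keys
          (sessions.map (fun s => sgetD s "project" "unknown")) := by
    have : (fun (ps : List String) s =>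
        let p := sgetD s "project" "unknown"
        if p ∈ ps then ps else ps ++ [p])
        = fun ps s => PySem.Set.add ps (sgetD s "project" "unknown") := by
      funext ps s; rw [PySem.Set.add_eq_ite]
    rw [this, ← PySem.Set.update_map_eq_foldl_add]
    rfl
  rw [hB, List.map_map]
  refine List.map_congr_left ?_
  intro c _
  simp only [Function.comp]
  simp only [getD_foldl_modify_gen sessions (fun s => sgetD s "project" "unknown") [] (fun l s => l ++ [s])]
  simp only [PySem.Dict.getD_empty, PySem.List.foldl_append_singleton_eq_self, List.nil_append]
  simp only [pvLine]
  set g := sessions.filter (fun s => sgetD s "project" "unknown" == c) with hg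
  -- the two set-building orders give the same element list
  rw [← filter_map_comm g (fun s => sgetD s "branch" "") (fun b => b != ""),
      ← filter_map_comm g (fun s => sgetD s "source" "") (fun x => x != "" && x != "claude")]
  set branches := PySem.List.sorted
      (PySem.Set.ofList ((g.filter (fun s => sgetD s "branch" "" != "")).map
        (fun s => sgetD s "branch" ""))) (fun x => x) false with hbr
  set sources := PySem.List.sorted
      (PySem.Set.ofList ((g.filter (fun s =>
          sgetD s "source" "" != "" && sgetD s "source" "" != "claude")).map
        (fun s => sgetD s "source" ""))) (fun x => x) false with hsr
  -- branch_str: A's length chain = B's take/drop decomposition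
  have hbs : (if branches = [] then "unknown"
      else if branches.length ≤ 2 then PySem.Str.join ", " branches
      else PySem.Str.join ", " (branches.take 2) ++ " +" ++
           PySem.Int.toStr ((branches.length : Int) - 2) ++ " more")
      = (if branches = [] then "unknown"
      else PySem.Str.join ", " (branches.take 2) ++
           (if branches.drop 2 ≠ [] then
              " +" ++ PySem.Int.toStr (((branches.drop 2).length : Int)) ++ " more" else "")) := by
    by_cases h0 : branches = []
    · simp [h0]
    · by_cases h2 : branches.length ≤ 2
      · have hd : branches.drop 2 = [] := by
          rw [List.drop_eq_nil_iff]; omega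
        have ht : branches.take 2 = branches := List.take_of_length_le h2
        simp [h0, h2, hd, ht]
      · have hd : branches.drop 2 ≠ [] := by
          rw [Ne, List.drop_eq_nil_iff]; omega
        have hl : (((branches.length - 2 : Nat)) : Int) = (branches.length : Int) - 2 := by
          omega
        simp [h0, h2, hd, hl, String.append_assoc]
  rw [hbs]
  simp [String.append_assoc]
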